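-- pv_equiv track=rewrite | github.com/singleron-RD/CeleScope | celescope/tools/parse_chemistry.py | create_mismatch_origin_dict
-- ===== SOURCE A (Python) =====
-- import itertools
--
-- def create_mismatch_seqs(seq: str, max_mismatch=1, allowed_bases="ACGTN") -> set[str]:
--     """Create all sequences within a specified number of mismatches from the input sequence.
--
--     >>> answer = set(["TCG", "AAG", "ACC", "ATG", "ACT", "ACN", "GCG", "ANG", "ACA", "ACG", "CCG", "AGG", "NCG"])
--     >>> seq_set = create_mismatch_seqs("ACG")
--     >>> seq_set == answer
--     True
--     >>> seq_set = create_mismatch_seqs("ACG", max_mismatch=0)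
--     >>> seq_set == set(["ACG"])
--     True
--     """
--     if max_mismatch < 0:
--         raise ValueError("max_mismatch must be non-negative")
--     if max_mismatch > len(seq):
--         raise ValueError(
--             f"max_mismatch ({max_mismatch}) cannot be greater than the sequence length ({len(seq)})"
--         )
--
--     result = set()
--     for n_mismatch in range(max_mismatch + 1):  # 包括0到max_mismatch
--         for locs in itertools.combinations(range(len(seq)), n_mismatch):
--             seq_locs = [
--                 list(allowed_bases) if i in locs else [base]
--                 for i, base in enumerate(seq)
--             ]
--             result.update("".join(p) for p in itertools.product(*seq_locs))
--     return result
--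
-- def create_mismatch_origin_dict(origin_seqs: list, n_mismatch=1) -> dict[str, str]:
--     """Create a dictionary mapping sequences with mismatches to their original sequences(in whitelist).
--
--     >>> origin_seqs = ["AACGTGAT", "AAACATCG"]
--     >>> mismatch_dict = create_mismatch_origin_dict(origin_seqs)
--     >>> mismatch_dict["AACGTGAA"] == "AACGTGAT"
--     True
--     """
--     result = {}
--     for origin_seq in origin_seqs:
--         origin_seq = origin_seq.strip()
--         if origin_seq == "":
--             continue
--         for mismatch_seq in create_mismatch_seqs(origin_seq, n_mismatch):
--             result[mismatch_seq] = origin_seq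
--     return result
-- ===== SOURCE B (Python) =====
-- def _position_choices(seq, start, d):
--     """Yield each ascending list of d positions of seq that are >= start."""
--     if d == 0:
--         yield []
--         return
--     for j in range(start, len(seq) - d + 1):
--         for rest in _position_choices(seq, j + 1, d - 1):
--             yield [j] + rest
--
--
-- def _substitutions(seq, positions):
--     """Yield seq with every position in `positions` replaced by each base that
--     differs from the original one (leftmost position varying slowest)."""
--     if not positions:
--         yield seq
--         return
--     j, rest = positions[0], positions[1:]
--     for b in "ACGTN":
--         if b != seq[j]:
--             for t in _substitutions(seq, rest):
--                 yield t[:j] + b + t[j + 1:]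
--
--
-- def _hamming_ball(seq, max_mismatch):
--     """The set of all sequences within max_mismatch substitutions of seq
--     (over the bases ACGTN), enumerated by exact mismatch count."""
--     if max_mismatch < 0:
--         raise ValueError("max_mismatch must be non-negative")
--     if max_mismatch > len(seq):
--         raise ValueError(
--             f"max_mismatch ({max_mismatch}) cannot be greater than the sequence length ({len(seq)})"
--         )
--     return {
--         variant
--         for d in range(max_mismatch + 1)
--         for positions in _position_choices(seq, 0, d)
--         for variant in _substitutions(seq, positions)
--     }
--
--
-- def create_mismatch_origin_dict(origin_seqs: list, n_mismatch=1) -> dict[str, str]: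
--     """Map every sequence within n_mismatch substitutions of a whitelist
--     sequence to that (stripped) whitelist sequence."""
--     result = {}
--     for origin_seq in origin_seqs:
--         origin_seq = origin_seq.strip()
--         if origin_seq == "":
--             continue
--         for mismatch_seq in _hamming_ball(origin_seq, n_mismatch):
--             result[mismatch_seq] = origin_seq
--     return result
-- ===== Notes on version B (the rewrite author's own statement) =====
-- stated objective: alternative
-- what changed: A builds each Hamming ball by itertools.combinations x itertools.product over all allowed bases, regenerating every lower-distance sequence at each level and relying on the set to absorb the duplicates; B's ball helper enumerates per exact mismatch count each ascending position combination and then only substitutions whose bases differ from the original, so every ball sequence is generated exactly once.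
import Mathlib
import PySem

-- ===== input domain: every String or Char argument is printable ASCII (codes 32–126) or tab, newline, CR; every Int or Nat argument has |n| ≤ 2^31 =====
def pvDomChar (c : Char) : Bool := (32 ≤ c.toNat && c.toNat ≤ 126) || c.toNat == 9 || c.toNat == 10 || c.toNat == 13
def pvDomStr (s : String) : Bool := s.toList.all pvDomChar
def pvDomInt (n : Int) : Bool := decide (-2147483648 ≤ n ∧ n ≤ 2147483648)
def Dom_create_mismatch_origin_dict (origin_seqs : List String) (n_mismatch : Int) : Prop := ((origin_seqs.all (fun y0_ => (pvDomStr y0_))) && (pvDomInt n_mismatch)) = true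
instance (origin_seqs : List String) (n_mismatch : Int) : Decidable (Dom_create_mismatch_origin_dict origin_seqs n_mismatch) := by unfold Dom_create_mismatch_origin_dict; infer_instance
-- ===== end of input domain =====

-- B changes the algorithm: instead of A's over-generation (combinations × full product over all
-- bases, regenerating every lower-distance sequence at each level) deduplicated through a set
-- before filling the dict, B enumerates each position combination and then only substitutions
-- whose bases differ from the original, so every ball sequence is produced exactly once and the
-- dict is filled directly — no set, no deduplication (objective: alternative).
-- Note: Python iterates A's set in hash order; the dict MAPPING is order-independent and dict
-- outputs are compared ignoring order; the ports fix first-insertion order.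

def allowedBases : List Char := ['A', 'C', 'G', 'T', 'N']

-- ===== PORT A =====
-- itertools.combinations(xs, n) for a list of distinct ints, lexicographic order
def pyCombinations (xs : List Int) : Nat → List (List Int) :=
  fun n =>
    match n, xs with
    | 0, _ => [[]]
    | _ + 1, [] => []
    | n + 1, x :: rest => (pyCombinations rest n).map (x :: ·) ++ pyCombinations rest (n + 1)

-- itertools.product(*lists), leftmost factor varies slowest
def pyProduct : List (List Char) → List (List Char)
  | [] => [[]]
  | l :: ls => l.flatMap (fun b => (pyProduct ls).map (b :: ·))

-- create_mismatch_seqs(seq, max_mismatch, "ACGTN"); where Python raises ValueError (max_mismatch < 0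
-- or > len(seq)) the port returns the empty set — those inputs are excluded by Pre_.
def mismatchSeqsA (seq : String) (max_mismatch : Int) : PySem.Set String :=
  if max_mismatch < 0 then PySem.Set.empty
  else if PySem.Str.len seq < max_mismatch then PySem.Set.empty
  else
    (List.range (max_mismatch.toNat + 1)).foldl (fun result n =>
      (pyCombinations (PySem.List.pyRange 0 (PySem.Str.len seq) 1) n).foldl (fun result locs =>
        let seq_locs := (PySem.List.enumerate seq.toList).map
          (fun p => if p.1 ∈ locs then allowedBases else [p.2])
        PySem.Set.update result ((pyProduct seq_locs).map (fun p => String.ofList p))) result)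
      PySem.Set.empty

def create_mismatch_origin_dict (origin_seqs : List String) (n_mismatch : Int) : List (String × String) :=
  (origin_seqs.foldl (fun (result : PySem.Dict String String) origin_seq =>
    let s := PySem.Str.strip origin_seq
    if s = "" then result
    else (mismatchSeqsA s n_mismatch).foldl (fun r t => r.insert t s) result)
    PySem.Dict.empty).items

-- ===== PORT B =====
-- _position_choices(seq, start, d): ascending lists of d positions ≥ start (generator → list)
def choicesB (cs : List Char) : Int → Nat → List (List Int)
  | _, 0 => [[]]
  | start, d + 1 =>
    (PySem.List.pyRange start ((cs.length : Int) - (d + 1) + 1) 1).flatMap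
      (fun j => (choicesB cs (j + 1) d).map (fun rest => j :: rest))

-- _substitutions(seq, positions): t[:j] + b + t[j+1:] is t.take j ++ b :: t.drop (j+1)
-- (positions are ≥ 0 and in range here, so toNat is exact and pyGet? returns some)
def substB (cs : List Char) : List Int → List (List Char)
  | [] => [cs]
  | j :: rest =>
    match PySem.List.pyGet? cs j with
    | none => []  -- unreachable: j is a valid position
    | some cj =>
      (allowedBases.filter (fun b => b ≠ cj)).flatMap
        (fun b => (substB cs rest).map (fun t => t.take j.toNat ++ b :: t.drop (j.toNat + 1)))

def create_mismatch_origin_dict_alt (origin_seqs : List String) (n_mismatch : Int) : List (String × String) :=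
  (origin_seqs.foldl (fun (result : PySem.Dict String String) origin_seq =>
    let s := PySem.Str.strip origin_seq
    if s = "" then result
    else if n_mismatch < 0 then result          -- Python raises ValueError: outside Pre_
    else if PySem.Str.len s < n_mismatch then result  -- Python raises ValueError: outside Pre_
    else
      (List.range (n_mismatch.toNat + 1)).foldl (fun r d =>
        (choicesB s.toList 0 d).foldl (fun r positions =>
          (substB s.toList positions).foldl
            (fun (r : PySem.Dict String String) t => r.insert (String.ofList t) s) r) r) result)
    PySem.Dict.empty).items

-- ===== PRECONDITION & SPEC =====
-- Pre_ excludes exactly the inputs where Python A raises ValueError: some sequence with a nonempty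
-- strip while n_mismatch is negative or exceeds that stripped sequence's length.
def Pre_create_mismatch_origin_dict (origin_seqs : List String) (n_mismatch : Int) : Prop :=
  ∀ s ∈ origin_seqs, PySem.Str.strip s = "" ∨
    (0 ≤ n_mismatch ∧ n_mismatch ≤ PySem.Str.len (PySem.Str.strip s))
instance (origin_seqs : List String) (n_mismatch : Int) : Decidable (Pre_create_mismatch_origin_dict origin_seqs n_mismatch) := by unfold Pre_create_mismatch_origin_dict; infer_instance
def pvWitness_create_mismatch_origin_dict : List String × Int := (["AC", " ", "GT"], 1)

def Spec_create_mismatch_origin_dict (origin_seqs : List String) (n_mismatch : Int) (out : List (String × String)) : Prop := out = create_mismatch_origin_dict_alt origin_seqs n_mismatch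
instance (origin_seqs : List String) (n_mismatch : Int) (out : List (String × String)) : Decidable (Spec_create_mismatch_origin_dict origin_seqs n_mismatch out) := by unfold Spec_create_mismatch_origin_dict; infer_instance

-- ===== CLAIM (what is proved, stated in full; the proofs are below) =====
def Claim_equal_create_mismatch_origin_dict : Prop := ∀ (origin_seqs : List String) (n_mismatch : Int), Dom_create_mismatch_origin_dict origin_seqs n_mismatch → Pre_create_mismatch_origin_dict origin_seqs n_mismatch → Spec_create_mismatch_origin_dict origin_seqs n_mismatch (create_mismatch_origin_dict origin_seqs n_mismatch)

-- ===== LEMMAS AND PROOFS =====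

-- Positionwise product lists: Pb = A's per-combination product (any allowed base at chosen
-- positions), Eb = the sub-product where every chosen position really differs.
def Pb : List Char → Int → List Int → List (List Char)
  | [], _, _ => [[]]
  | c :: cs, i, D => (if i ∈ D then allowedBases else [c]).flatMap (fun b => (Pb cs (i + 1) D).map (b :: ·))

def Eb : List Char → Int → List Int → List (List Char)
  | [], _, _ => [[]]
  | c :: cs, i, D => (if i ∈ D then allowedBases.filter (· ≠ c) else [c]).flatMap (fun b => (Eb cs (i + 1) D).map (b :: ·))

def PbR : List Char → Int → List Int → List Char → Prop
  | [], _, _, t => t = []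
  | c :: cs, i, D, t => ∃ b t', t = b :: t' ∧ (if i ∈ D then b ∈ allowedBases else b = c) ∧ PbR cs (i + 1) D t'

def EbR : List Char → Int → List Int → List Char → Prop
  | [], _, _, t => t = []
  | c :: cs, i, D, t => ∃ b t', t = b :: t' ∧ (if i ∈ D then b ∈ allowedBases ∧ b ≠ c else b = c) ∧ EbR cs (i + 1) D t'

-- positions (labelled from i) where t differs from cs
def difs : List Char → Int → List Char → List Int
  | c :: cs, i, b :: t => (if b = c then ([] : List Int) else [i]) ++ difs cs (i + 1) t
  | _, _, _ => []

def blocksE (cs : List Char) (Ds : List (List Int)) : List String :=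
  Ds.flatMap (fun D => (Eb cs 0 D).map (fun t => String.ofList t))

def allCombos (L : Int) (N : Nat) : List (List Int) :=
  (List.range N).flatMap (fun m => pyCombinations (PySem.List.pyRange 0 L 1) m)

-- generic list lemmas -------------------------------------------------------

theorem pv_foldl_flatMap {α β γ : Type} (l : List α) (f : α → List β) (g : γ → β → γ) (init : γ) :
    (l.flatMap f).foldl g init = l.foldl (fun acc a => (f a).foldl g acc) init := by
  induction l generalizing init with
  | nil => rfl
  | cons x xs ih => simp [List.flatMap_cons, List.foldl_append, ih]

theorem pv_nodup_flatMap {α β : Type} (l : List α) (f : α → List β)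
    (h1 : ∀ a ∈ l, (f a).Nodup)
    (h2 : l.Pairwise (fun a b => ∀ x ∈ f a, x ∉ f b)) :
    (l.flatMap f).Nodup := by
  induction l with
  | nil => simp
  | cons a l ih =>
    rw [List.flatMap_cons, List.nodup_append]
    refine ⟨h1 a (by simp), ih (fun b hb => h1 b (by simp [hb])) (List.Pairwise.of_cons h2), ?_⟩
    intro x hx y hy hxy
    rw [List.mem_flatMap] at hy
    obtain ⟨b, hb, hyb⟩ := hy
    exact (List.rel_of_pairwise_cons h2 hb) x hx (hxy ▸ hyb)

theorem pv_pairwise_flatMap {α β : Type} (l : List α) (f : α → List β) (S : β → β → Prop)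
    (h1 : ∀ a ∈ l, (f a).Pairwise S)
    (h2 : l.Pairwise (fun a b => ∀ x ∈ f a, ∀ y ∈ f b, S x y)) :
    (l.flatMap f).Pairwise S := by
  induction l with
  | nil => simp
  | cons a l ih =>
    rw [List.flatMap_cons, List.pairwise_append]
    refine ⟨h1 a (by simp), ih (fun b hb => h1 b (by simp [hb])) (List.Pairwise.of_cons h2), ?_⟩
    intro x hx y hy
    rw [List.mem_flatMap] at hy
    obtain ⟨b, hb, hyb⟩ := hy
    exact (List.rel_of_pairwise_cons h2 hb) x hx y hyb

theorem pv_nodup_prodCons {α : Type} (l : List α) (r : List (List α))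
    (hl : l.Nodup) (hr : r.Nodup) :
    (l.flatMap (fun b => r.map (b :: ·))).Nodup := by
  apply pv_nodup_flatMap
  · intro b _; exact hr.map (fun t t' h => by injection h)
  · refine hl.imp_of_mem ?_
    intro a b _ _ hne x hx hx'
    rw [List.mem_map] at hx hx'
    obtain ⟨t, _, rfl⟩ := hx
    obtain ⟨t', _, he⟩ := hx'
    exact hne (by injection he with h1 _; exact h1.symm)

theorem pv_foldl_add_filter {α β : Type} [BEq β] [LawfulBEq β]
    (p : α → Bool) (f : α → β) :
    ∀ (xs : List α) (S : List β),
      ((xs.filter p).map f).Nodup →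
      (∀ x ∈ xs, p x → f x ∉ S) →
      (∀ x ∈ xs, ¬ p x = true → f x ∈ S) →
      xs.foldl (fun S x => PySem.Set.add S (f x)) S = S ++ (xs.filter p).map f := by
  intro xs
  induction xs with
  | nil => intro S _ _ _; simp
  | cons x xs ih =>
    intro S hnd hnew hold
    by_cases hp : p x = true
    · have hfresh : f x ∉ S := hnew x (by simp) hp
      have hadd : PySem.Set.add S (f x) = S ++ [f x] := PySem.Set.add_of_not_mem hfresh
      rw [List.foldl_cons, hadd, ih (S ++ [f x]) ?_ ?_ ?_]
      · simp [List.filter_cons, hp]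
      · have := hnd; simp only [List.filter_cons, hp, if_true, List.map_cons, List.nodup_cons] at this
        exact this.2
      · intro y hy hpy
        simp only [List.mem_append, List.mem_singleton, not_or]
        refine ⟨hnew y (by simp [hy]) hpy, ?_⟩
        have := hnd; simp only [List.filter_cons, hp, if_true, List.map_cons, List.nodup_cons] at this
        intro he
        exact this.1 (he ▸ List.mem_map_of_mem (List.mem_filter.mpr ⟨hy, hpy⟩))
      · intro y hy hpy
        exact List.mem_append_left _ (hold y (by simp [hy]) hpy)
    · have hin : f x ∈ S := hold x (by simp) hp
      have hadd : PySem.Set.add S (f x) = S := PySem.Set.add_of_mem hin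
      rw [List.foldl_cons, hadd, ih S ?_ ?_ ?_]
      · simp [List.filter_cons, hp]
      · simpa [List.filter_cons, hp] using hnd
      · intro y hy hpy; exact hnew y (by simp [hy]) hpy
      · intro y hy hpy; exact hold y (by simp [hy]) hpy

-- combination lemmas --------------------------------------------------------

theorem comb_zero (xs : List Int) : pyCombinations xs 0 = [[]] := by
  cases xs <;> rfl

theorem comb_short : ∀ (xs : List Int) (n : Nat), xs.length < n → pyCombinations xs n = [] := by
  intro xs
  induction xs with
  | nil => intro n hn; cases n with
    | zero => omega
    | succ m => rfl
  | cons x rest ih =>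
    intro n hn
    cases n with
    | zero => simp at hn
    | succ m =>
      simp only [pyCombinations]
      rw [ih m (by simp at hn ⊢; omega), ih (m + 1) (by simp at hn ⊢; omega)]
      simp

theorem comb_sound : ∀ (xs : List Int) (n : Nat) (D : List Int),
    D ∈ pyCombinations xs n → D.length = n ∧ D.Sublist xs := by
  intro xs
  induction xs with
  | nil => intro n D h; cases n with
    | zero => simp [pyCombinations] at h; simp [h]
    | succ m => simp [pyCombinations] at h
  | cons x rest ih =>
    intro n D h
    cases n with
    | zero =>
      simp [pyCombinations] at h
      simp [h]
    | succ m =>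
      simp only [pyCombinations, List.mem_append, List.mem_map] at h
      rcases h with ⟨D', hD', rfl⟩ | h
      · obtain ⟨hl, hs⟩ := ih m D' hD'
        exact ⟨by simp [hl], List.Sublist.cons₂ x hs⟩
      · obtain ⟨hl, hs⟩ := ih (m + 1) D h
        exact ⟨hl, hs.cons x⟩

theorem comb_complete : ∀ (xs D : List Int), D.Sublist xs → D ∈ pyCombinations xs D.length := by
  intro xs D h
  induction h with
  | slnil => simp [pyCombinations]
  | @cons D' rest x hsub ih =>
    cases hD : D' with
    | nil => subst hD; simp [pyCombinations]
    | cons d ds =>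
      subst hD
      simp only [List.length_cons, pyCombinations, List.mem_append]
      exact Or.inr ih
  | @cons₂ D' rest x hsub ih =>
    simp only [List.length_cons, pyCombinations, List.mem_append, List.mem_map]
    exact Or.inl ⟨D', ih, rfl⟩

theorem comb_nodup : ∀ (xs : List Int) (n : Nat), xs.Nodup → (pyCombinations xs n).Nodup := by
  intro xs
  induction xs with
  | nil => intro n _; cases n with
    | zero => simp [pyCombinations]
    | succ m => simp [pyCombinations]
  | cons x rest ih =>
    intro n hnd
    cases n with
    | zero => simp [pyCombinations]
    | succ m =>
      simp only [pyCombinations]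
      rw [List.nodup_append]
      refine ⟨(ih m hnd.of_cons).map (fun a b h => by injection h), ih (m + 1) hnd.of_cons, ?_⟩
      intro y hy z hz he
      subst he
      rw [List.mem_map] at hy
      obtain ⟨D', _, rfl⟩ := hy
      have hs := (comb_sound rest (m + 1) _ hz).2
      have : x ∈ rest := hs.subset (by simp)
      exact (List.nodup_cons.mp hnd).1 this

-- allCombos lemmas ----------------------------------------------------------

theorem allCombos_sound {L : Int} {N : Nat} {D : List Int} (h : D ∈ allCombos L N) :
    D.Sublist (PySem.List.pyRange 0 L 1) ∧ D.length < N := by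
  unfold allCombos at h
  rw [List.mem_flatMap] at h
  obtain ⟨m, hm, hD⟩ := h
  obtain ⟨hl, hs⟩ := comb_sound _ m D hD
  exact ⟨hs, hl ▸ List.mem_range.mp hm⟩

theorem allCombos_complete {L : Int} {N : Nat} {D : List Int}
    (h1 : D.Sublist (PySem.List.pyRange 0 L 1)) (h2 : D.length < N) : D ∈ allCombos L N := by
  unfold allCombos
  rw [List.mem_flatMap]
  exact ⟨D.length, List.mem_range.mpr h2, comb_complete _ D h1⟩

theorem allCombos_nodup (L : Int) (N : Nat) : (allCombos L N).Nodup := by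
  apply pv_nodup_flatMap
  · intro m _; exact comb_nodup _ m (PySem.List.nodup_pyRange_one 0 L)
  · refine (List.pairwise_lt_range).imp ?_
    intro a b hab x hx hx'
    have h1 := (comb_sound _ a x hx).1
    have h2 := (comb_sound _ b x hx').1
    omega

theorem allCombos_pairwise_len (L : Int) (N : Nat) :
    (allCombos L N).Pairwise (fun D E => D.length ≤ E.length) := by
  apply pv_pairwise_flatMap
  · intro m _
    apply List.pairwise_of_forall_mem_list
    intro a ha b hb
    rw [(comb_sound _ m a ha).1, (comb_sound _ m b hb).1]
  · refine (List.pairwise_lt_range).imp ?_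
    intro a b hab x hx y hy
    rw [(comb_sound _ a x hx).1, (comb_sound _ b y hy).1]
    omega

-- membership characterizations ----------------------------------------------

theorem mem_Pb : ∀ (cs : List Char) (i : Int) (D : List Int) (t : List Char),
    t ∈ Pb cs i D ↔ PbR cs i D t := by
  intro cs
  induction cs with
  | nil => intro i D t; simp [Pb, PbR]
  | cons c cs ih =>
    intro i D t
    simp only [Pb, PbR, List.mem_flatMap, List.mem_map]
    constructor
    · rintro ⟨b, hb, t', ht', rfl⟩
      refine ⟨b, t', rfl, ?_, (ih _ D t').mp ht'⟩
      split_ifs at hb ⊢ with h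
      · exact hb
      · simpa using hb
    · rintro ⟨b, t', rfl, hb, ht'⟩
      refine ⟨b, ?_, t', (ih _ D t').mpr ht', rfl⟩
      split_ifs at hb ⊢ with h
      · exact hb
      · simp [hb]

theorem mem_Eb : ∀ (cs : List Char) (i : Int) (D : List Int) (t : List Char),
    t ∈ Eb cs i D ↔ EbR cs i D t := by
  intro cs
  induction cs with
  | nil => intro i D t; simp [Eb, EbR]
  | cons c cs ih =>
    intro i D t
    simp only [Eb, EbR, List.mem_flatMap, List.mem_map]
    constructor
    · rintro ⟨b, hb, t', ht', rfl⟩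
      refine ⟨b, t', rfl, ?_, (ih _ D t').mp ht'⟩
      split_ifs at hb ⊢ with h
      · simpa using hb
      · simpa using hb
    · rintro ⟨b, t', rfl, hb, ht'⟩
      refine ⟨b, ?_, t', (ih _ D t').mpr ht', rfl⟩
      split_ifs at hb ⊢ with h
      · simpa using hb
      · simp [hb]

theorem PbR_congr : ∀ (cs : List Char) (i : Int) (D D' : List Int) (t : List Char),
    (∀ j, i ≤ j → (j ∈ D ↔ j ∈ D')) → PbR cs i D t → PbR cs i D' t := by
  intro cs
  induction cs with
  | nil => intro i D D' t _ h; exact h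
  | cons c cs ih =>
    rintro i D D' t hmem ⟨b, t', rfl, hb, ht'⟩
    refine ⟨b, t', rfl, ?_, ih (i + 1) D D' t' (fun j hj => hmem j (by omega)) ht'⟩
    rw [if_congr (hmem i le_rfl) rfl rfl] at hb
    exact hb

theorem EbR_congr : ∀ (cs : List Char) (i : Int) (D D' : List Int) (t : List Char),
    (∀ j, i ≤ j → (j ∈ D ↔ j ∈ D')) → EbR cs i D t → EbR cs i D' t := by
  intro cs
  induction cs with
  | nil => intro i D D' t _ h; exact h
  | cons c cs ih =>
    rintro i D D' t hmem ⟨b, t', rfl, hb, ht'⟩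
    refine ⟨b, t', rfl, ?_, ih (i + 1) D D' t' (fun j hj => hmem j (by omega)) ht'⟩
    rw [if_congr (hmem i le_rfl) rfl rfl] at hb
    exact hb

theorem Eb_congr : ∀ (cs : List Char) (i : Int) (D D' : List Int),
    (∀ j, i ≤ j → (j ∈ D ↔ j ∈ D')) → Eb cs i D = Eb cs i D' := by
  intro cs
  induction cs with
  | nil => intro _ _ _ _; rfl
  | cons c cs ih =>
    intro i D D' hmem
    simp only [Eb]
    rw [if_congr (hmem i le_rfl) rfl rfl, ih (i + 1) D D' (fun j hj => hmem j (by omega))]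

theorem difs_lb : ∀ (cs : List Char) (i : Int) (t : List Char), ∀ x ∈ difs cs i t, i ≤ x := by
  intro cs
  induction cs with
  | nil => intro i t x hx; simp [difs] at hx
  | cons c cs ih =>
    intro i t x hx
    cases t with
    | nil => simp [difs] at hx
    | cons b t =>
      simp only [difs, List.mem_append] at hx
      rcases hx with hx | hx
      · split_ifs at hx <;> simp at hx; omega
      · have := ih (i + 1) t x hx; omega

-- head analysis of a sublist of a range
theorem sublist_range_head {D : List Int} {i m : Int}
    (h : D.Sublist (PySem.List.pyRange i m 1)) :
    (i ∈ D → ∃ D', D = i :: D' ∧ D'.Sublist (PySem.List.pyRange (i + 1) m 1)) ∧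
    (i ∉ D → D.Sublist (PySem.List.pyRange (i + 1) m 1)) := by
  by_cases him : i < m
  · rw [PySem.List.pyRange_one_cons him, List.sublist_cons_iff] at h
    rcases h with h | ⟨r, rfl, hr⟩
    · constructor
      · intro hi
        have := h.subset hi
        rw [PySem.List.mem_pyRange_one] at this
        omega
      · intro _; exact h
    · constructor
      · intro _; exact ⟨r, rfl, hr⟩
      · intro hi; exact absurd (by simp) hi
  · rw [PySem.List.pyRange_one_eq_nil (by omega)] at h
    rw [List.sublist_nil] at h
    subst h
    exact ⟨fun hi => absurd hi (by simp), fun _ => List.nil_sublist _⟩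

theorem len_succ_cast (i : Int) (n : Nat) : i + ((n + 1 : Nat) : Int) = (i + 1) + (n : Int) := by
  push_cast; ring

theorem difs_sublist : ∀ (cs : List Char) (i : Int) (D : List Int) (t : List Char),
    PbR cs i D t → D.Sublist (PySem.List.pyRange i (i + cs.length) 1) →
    (difs cs i t).Sublist D := by
  intro cs
  induction cs with
  | nil => intro i D t _ _; exact List.nil_sublist D
  | cons c cs ih =>
    rintro i D t ⟨b, t', rfl, hb, ht'⟩ hD
    rw [List.length_cons, len_succ_cast] at hD
    simp only [difs]
    by_cases hi : i ∈ D
    · obtain ⟨D', rfl, hD'⟩ := (sublist_range_head hD).1 hi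
      have ht'' : PbR cs (i + 1) D' t' := by
        refine PbR_congr cs (i + 1) (i :: D') D' t' ?_ ht'
        intro j hj; simp; omega
      have hsub := ih (i + 1) D' t' ht'' hD'
      by_cases hbc : b = c
      · simp only [hbc, if_pos rfl, List.nil_append]
        exact hsub.trans (List.sublist_cons_self i D')
      · simp only [if_neg hbc, List.cons_append, List.nil_append]
        exact hsub.cons₂ i
    · have hb' : b = c := by simpa [if_neg hi] using hb
      have hD2 := (sublist_range_head hD).2 hi
      simp only [hb', if_pos rfl, List.nil_append]
      exact ih (i + 1) D t' ht' hD2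

theorem EbR_difs : ∀ (cs : List Char) (i : Int) (D : List Int) (t : List Char),
    PbR cs i D t → EbR cs i (difs cs i t) t := by
  intro cs
  induction cs with
  | nil => intro i D t h; exact h
  | cons c cs ih =>
    rintro i D t ⟨b, t', rfl, hb, ht'⟩
    have hnot : i ∉ difs cs (i + 1) t' := fun hx => by have := difs_lb cs (i + 1) t' i hx; omega
    by_cases hbc : b = c
    · subst hbc
      have hd : difs (b :: cs) i (b :: t') = difs cs (i + 1) t' := by simp [difs]
      rw [hd]
      exact ⟨b, t', rfl, by rw [if_neg hnot], ih (i + 1) D t' ht'⟩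
    · have hd : difs (c :: cs) i (b :: t') = i :: difs cs (i + 1) t' := by simp [difs, hbc]
      rw [hd]
      have hball : b ∈ allowedBases := by
        by_cases hi : i ∈ D
        · simpa [if_pos hi] using hb
        · exact absurd (by simpa [if_neg hi] using hb) hbc
      refine ⟨b, t', rfl, by rw [if_pos (by simp)]; exact ⟨hball, hbc⟩, ?_⟩
      refine EbR_congr cs (i + 1) (difs cs (i + 1) t') (i :: difs cs (i + 1) t') t' ?_ (ih (i + 1) D t' ht')
      intro j hj; simp; omega

theorem difs_of_EbR : ∀ (cs : List Char) (i : Int) (D : List Int) (t : List Char),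
    EbR cs i D t → D.Sublist (PySem.List.pyRange i (i + cs.length) 1) → difs cs i t = D := by
  intro cs
  induction cs with
  | nil =>
    intro i D t ht hD
    rw [List.length_nil] at hD
    simp only [Int.natCast_zero, add_zero] at hD
    rw [PySem.List.pyRange_one_eq_nil le_rfl, List.sublist_nil] at hD
    subst hD
    cases t <;> simp [difs]
  | cons c cs ih =>
    rintro i D t ⟨b, t', rfl, hb, ht'⟩ hD
    rw [List.length_cons, len_succ_cast] at hD
    by_cases hi : i ∈ D
    · obtain ⟨D', rfl, hD'⟩ := (sublist_range_head hD).1 hi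
      have hbc : b ≠ c := by
        have := hb; rw [if_pos (by simp)] at this; exact this.2
      simp only [difs, if_neg hbc, List.cons_append, List.nil_append]
      have ht'' : EbR cs (i + 1) D' t' := by
        refine EbR_congr cs (i + 1) (i :: D') D' t' ?_ ht'
        intro j hj; simp; omega
      rw [ih (i + 1) D' t' ht'' hD']
    · have hbc : b = c := by simpa [if_neg hi] using hb
      have hD2 := (sublist_range_head hD).2 hi
      simp only [difs, hbc, if_pos rfl, List.nil_append]
      exact ih (i + 1) D t' ht' hD2

theorem difs_sublist_range : ∀ (cs : List Char) (i : Int) (t : List Char) (D : List Int),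
    PbR cs i D t → (difs cs i t).Sublist (PySem.List.pyRange i (i + cs.length) 1) := by
  intro cs
  induction cs with
  | nil => intro i t D _; exact List.nil_sublist _
  | cons c cs ih =>
    rintro i t D ⟨b, t', rfl, hb, ht'⟩
    rw [List.length_cons, len_succ_cast, PySem.List.pyRange_one_cons (by
      have : (0 : Int) ≤ (cs.length : Int) := Int.natCast_nonneg _
      omega)]
    have hsub := ih (i + 1) t' D ht'
    simp only [difs]
    by_cases hbc : b = c
    · simp only [hbc, if_pos rfl, List.nil_append]
      exact hsub.cons i
    · simp only [if_neg hbc, List.cons_append, List.nil_append]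
      exact hsub.cons₂ i

theorem allowed_nodup : allowedBases.Nodup := by decide

theorem nodup_Eb : ∀ (cs : List Char) (i : Int) (D : List Int), (Eb cs i D).Nodup := by
  intro cs
  induction cs with
  | nil => intro i D; simp [Eb]
  | cons c cs ih =>
    intro i D
    apply pv_nodup_prodCons
    · split_ifs
      · exact allowed_nodup.filter _
      · simp
    · exact ih (i + 1) D

theorem Pb_congr : ∀ (cs : List Char) (i : Int) (D D' : List Int),
    (∀ j, i ≤ j → (j ∈ D ↔ j ∈ D')) → Pb cs i D = Pb cs i D' := by
  intro cs
  induction cs with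
  | nil => intro _ _ _ _; rfl
  | cons c cs ih =>
    intro i D D' hmem
    simp only [Pb]
    rw [if_congr (hmem i le_rfl) rfl rfl, ih (i + 1) D D' (fun j hj => hmem j (by omega))]

theorem Eb_eq_filter : ∀ (cs : List Char) (i : Int) (D : List Int),
    D.Sublist (PySem.List.pyRange i (i + cs.length) 1) →
    Eb cs i D = (Pb cs i D).filter (fun t => decide (difs cs i t = D)) := by
  intro cs
  induction cs with
  | nil =>
    intro i D hD
    rw [List.length_nil] at hD
    simp only [Int.natCast_zero, add_zero] at hD
    rw [PySem.List.pyRange_one_eq_nil le_rfl, List.sublist_nil] at hD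
    subst hD
    simp [Eb, Pb, difs]
  | cons c cs ih =>
    intro i D hD
    rw [List.length_cons, len_succ_cast] at hD
    by_cases hi : i ∈ D
    · obtain ⟨D', rfl, hD'⟩ := (sublist_range_head hD).1 hi
      have hmm : ∀ j : Int, i + 1 ≤ j → (j ∈ (i :: D' : List Int) ↔ j ∈ D') := by
        intro j hj; simp; omega
      simp only [Eb, Pb, if_pos hi]
      rw [List.filter_flatMap]
      have step : ∀ b : Char,
          (((Pb cs (i + 1) (i :: D')).map (b :: ·)).filter
              (fun t => decide (difs (c :: cs) i t = i :: D'))) =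
            (if b = c then [] else ((Eb cs (i + 1) (i :: D')).map (b :: ·))) := by
        intro b
        rw [List.filter_map]
        by_cases hbc : b = c
        · subst hbc
          rw [if_pos rfl]
          have : ∀ t ∈ Pb cs (i + 1) (i :: D'),
              ¬ ((fun t => decide (difs (b :: cs) i t = i :: D')) ∘ (b :: ·)) t = true := by
            intro t _
            simp only [Function.comp, difs, if_pos rfl, List.nil_append, decide_eq_true_eq]
            intro he
            simp only [if_true, List.nil_append] at he
            have : i ∈ difs cs (i + 1) t := by rw [he]; simp
            have := difs_lb cs (i + 1) t i this
            omega
          rw [List.filter_eq_nil_iff.mpr this, List.map_nil]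
        · rw [if_neg hbc]
          have hcongr : ∀ t ∈ Pb cs (i + 1) (i :: D'),
              ((fun t => decide (difs (c :: cs) i t = i :: D')) ∘ (b :: ·)) t =
                (fun t => decide (difs cs (i + 1) t = D')) t := by
            intro t _
            simp only [Function.comp]
            apply decide_eq_decide.mpr
            simp [difs, hbc]
          rw [List.filter_congr hcongr]
          congr 1
          rw [Pb_congr cs (i + 1) (i :: D') D' hmm, Eb_congr cs (i + 1) (i :: D') D' hmm]
          exact (ih (i + 1) D' hD').symm
      symm
      simp only [step]
      show allowedBases.flatMap (fun b => if b = c then [] else ((Eb cs (i + 1) (i :: D')).map (b :: ·)))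
        = (allowedBases.filter (fun b => b ≠ c)).flatMap (fun b => (Eb cs (i + 1) (i :: D')).map (b :: ·))
      generalize (Eb cs (i + 1) (i :: D')) = E
      induction allowedBases with
      | nil => rfl
      | cons x xs ihx =>
        by_cases hx : x = c <;>
          simp [List.flatMap_cons, List.filter_cons, hx, ihx]
    · have hD2 := (sublist_range_head hD).2 hi
      simp only [Eb, Pb, if_neg hi, List.flatMap_cons, List.flatMap_nil, List.append_nil]
      rw [List.filter_map]
      have hcongr : ∀ t ∈ Pb cs (i + 1) D,
          ((fun t => decide (difs (c :: cs) i t = D)) ∘ (c :: ·)) t =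
            (fun t => decide (difs cs (i + 1) t = D)) t := by
        intro t _
        simp only [Function.comp]
        apply decide_eq_decide.mpr
        simp [difs]
      rw [List.filter_congr hcongr, ← ih (i + 1) D hD2]

-- the dedup induction -------------------------------------------------------

theorem mk_injective : ∀ (a b : List Char), String.ofList a = String.ofList b → a = b := by
  intro a b h
  have := congrArg String.toList h
  rwa [String.toList_ofList, String.toList_ofList] at this

theorem mem_blocksE {cs : List Char} {Ds : List (List Int)} {t : List Char} :
    String.ofList t ∈ blocksE cs Ds ↔ ∃ D ∈ Ds, t ∈ Eb cs 0 D := by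
  unfold blocksE
  rw [List.mem_flatMap]
  constructor
  · rintro ⟨D, hD, ht⟩
    rw [List.mem_map] at ht
    obtain ⟨t', ht', he⟩ := ht
    exact ⟨D, hD, (mk_injective t' t he) ▸ ht'⟩
  · rintro ⟨D, hD, ht⟩
    exact ⟨D, hD, List.mem_map_of_mem ht⟩

theorem blocks_fold (cs : List Char) (N : Nat) :
    ∀ (Ds_suf Ds_pre : List (List Int)),
      allCombos (cs.length : Int) N = Ds_pre ++ Ds_suf →
      Ds_suf.foldl (fun S D => (Pb cs 0 D).foldl (fun S t => PySem.Set.add S (String.ofList t)) S)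
        (blocksE cs Ds_pre) = blocksE cs (Ds_pre ++ Ds_suf) := by
  intro Ds_suf
  induction Ds_suf with
  | nil => intro Ds_pre _; simp
  | cons D rest ih =>
    intro Ds_pre h
    have hDall : D ∈ allCombos (cs.length : Int) N := by rw [h]; simp
    have hDsub0 : D.Sublist (PySem.List.pyRange 0 (cs.length : Int) 1) := (allCombos_sound hDall).1
    have hDsub : D.Sublist (PySem.List.pyRange 0 (0 + (cs.length : Int)) 1) := by
      rwa [zero_add]
    have hnd := allCombos_nodup (cs.length : Int) N
    rw [h] at hnd
    have hDnotpre : D ∉ Ds_pre := by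
      rw [List.nodup_append] at hnd
      intro hc
      exact hnd.2.2 D hc D (by simp) rfl
    have hstep : (Pb cs 0 D).foldl (fun S t => PySem.Set.add S (String.ofList t)) (blocksE cs Ds_pre)
        = blocksE cs (Ds_pre ++ [D]) := by
      rw [pv_foldl_add_filter (fun t => decide (difs cs 0 t = D)) (fun t => String.ofList t)
        (Pb cs 0 D) (blocksE cs Ds_pre) ?_ ?_ ?_]
      · rw [← Eb_eq_filter cs 0 D hDsub]
        unfold blocksE
        simp
      · rw [← Eb_eq_filter cs 0 D hDsub]
        exact (nodup_Eb cs 0 D).map mk_injective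
      · intro x hx hpx
        rw [decide_eq_true_eq] at hpx
        intro hmem
        obtain ⟨D', hD', hxD'⟩ := mem_blocksE.mp hmem
        have hD'all : D' ∈ allCombos (cs.length : Int) N := by rw [h]; simp [hD']
        have hD'sub : D'.Sublist (PySem.List.pyRange 0 (0 + (cs.length : Int)) 1) := by
          rw [zero_add]; exact (allCombos_sound hD'all).1
        have : difs cs 0 x = D' := difs_of_EbR cs 0 D' x ((mem_Eb cs 0 D' x).mp hxD') hD'sub
        rw [hpx] at this
        exact hDnotpre (this ▸ hD')
      · intro x hx hpx
        rw [decide_eq_true_eq] at hpx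
        have hPR : PbR cs 0 D x := (mem_Pb cs 0 D x).mp hx
        have hds : (difs cs 0 x).Sublist D := difs_sublist cs 0 D x hPR hDsub
        have hlen : (difs cs 0 x).length < D.length := by
          rcases Nat.lt_or_ge (difs cs 0 x).length D.length with hlt | hge
          · exact hlt
          · exact absurd (hds.eq_of_length (le_antisymm hds.length_le hge)) hpx
        have hdr : (difs cs 0 x).Sublist (PySem.List.pyRange 0 (cs.length : Int) 1) := by
          have := difs_sublist_range cs 0 x D hPR
          rwa [zero_add] at this
        have hdall : difs cs 0 x ∈ allCombos (cs.length : Int) N :=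
          allCombos_complete hdr (by have := (allCombos_sound hDall).2; omega)
        have hpl := allCombos_pairwise_len (cs.length : Int) N
        rw [h, List.pairwise_append] at hpl
        have hdpre : difs cs 0 x ∈ Ds_pre := by
          rw [h, List.mem_append] at hdall
          rcases hdall with hp | hp
          · exact hp
          · exfalso
            rcases List.mem_cons.mp hp with rfl | hp'
            · omega
            · have hrel := List.rel_of_pairwise_cons hpl.2.1 hp'
              omega
        exact mem_blocksE.mpr ⟨difs cs 0 x, hdpre,
          (mem_Eb cs 0 _ x).mpr (EbR_difs cs 0 D x hPR)⟩
    rw [List.foldl_cons, hstep, ih (Ds_pre ++ [D]) (by rw [h]; simp)]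
    simp

-- bridges to the ports ------------------------------------------------------

theorem productA_eq_Pb : ∀ (cs : List Char) (s : Int) (D : List Int),
    pyProduct ((PySem.List.enumerate cs s).map (fun p => if p.1 ∈ D then allowedBases else [p.2]))
      = Pb cs s D := by
  intro cs
  induction cs with
  | nil => intro s D; rfl
  | cons c cs ih =>
    intro s D
    rw [PySem.List.enumerate_cons, List.map_cons]
    simp only [pyProduct, Pb, ih (s + 1) D]

theorem setA_eq (seq : String) (k : Int) (h0 : 0 ≤ k) (hk : k ≤ PySem.Str.len seq) :
    mismatchSeqsA seq k = blocksE seq.toList (allCombos (seq.toList.length : Int) (k.toNat + 1)) := by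
  unfold mismatchSeqsA
  rw [if_neg (by omega), if_neg (by rw [PySem.Str.len_eq] at hk ⊢; omega)]
  have hbody : ∀ (S : PySem.Set String) (n : Nat),
      (pyCombinations (PySem.List.pyRange 0 (PySem.Str.len seq) 1) n).foldl (fun result locs =>
        PySem.Set.update result
          ((pyProduct ((PySem.List.enumerate seq.toList).map
            (fun p => if p.1 ∈ locs then allowedBases else [p.2]))).map
            (fun p => String.ofList p))) S
      = (pyCombinations (PySem.List.pyRange 0 (seq.toList.length : Int) 1) n).foldl
          (fun S D => (Pb seq.toList 0 D).foldl (fun S t => PySem.Set.add S (String.ofList t)) S) S := by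
    intro S n
    rw [PySem.Str.len_eq]
    apply PySem.List.foldl_congr_mem
    intro S' D _
    rw [PySem.Set.update_map_eq_foldl_add, productA_eq_Pb]
  calc (List.range (k.toNat + 1)).foldl (fun result n =>
        (pyCombinations (PySem.List.pyRange 0 (PySem.Str.len seq) 1) n).foldl (fun result locs =>
          PySem.Set.update result
            ((pyProduct ((PySem.List.enumerate seq.toList).map
              (fun p => if p.1 ∈ locs then allowedBases else [p.2]))).map
              (fun p => String.ofList p))) result) PySem.Set.empty
      = (List.range (k.toNat + 1)).foldl (fun S n =>
          (pyCombinations (PySem.List.pyRange 0 (seq.toList.length : Int) 1) n).foldl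
            (fun S D => (Pb seq.toList 0 D).foldl (fun S t => PySem.Set.add S (String.ofList t)) S) S)
          PySem.Set.empty := by
        apply PySem.List.foldl_congr_mem
        intro S n _
        exact hbody S n
    _ = (allCombos (seq.toList.length : Int) (k.toNat + 1)).foldl
          (fun S D => (Pb seq.toList 0 D).foldl (fun S t => PySem.Set.add S (String.ofList t)) S)
          PySem.Set.empty := by
        rw [allCombos, pv_foldl_flatMap]
    _ = blocksE seq.toList (allCombos (seq.toList.length : Int) (k.toNat + 1)) := by
        have := blocks_fold seq.toList (k.toNat + 1)
          (allCombos (seq.toList.length : Int) (k.toNat + 1)) [] rfl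
        simpa [blocksE] using this

-- B-side lemmas --------------------------------------------------------------

theorem choices_mem_ge : ∀ (d : Nat) (cs : List Char) (start : Int) (D : List Int),
    D ∈ choicesB cs start d → ∀ x ∈ D, start ≤ x := by
  intro d
  induction d with
  | zero => intro cs start D hD x hx; simp [choicesB] at hD; subst hD; simp at hx
  | succ d ih =>
    intro cs start D hD x hx
    simp only [choicesB, List.mem_flatMap, List.mem_map] at hD
    obtain ⟨j, hj, D', hD', rfl⟩ := hD
    rw [PySem.List.mem_pyRange_one] at hj
    rcases List.mem_cons.mp hx with rfl | hx'
    · omega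
    · have := ih cs (j + 1) D' hD' x hx'
      omega

theorem sub_Eb : ∀ (cs : List Char) (m : Nat) (i : Int) (D : List Int) (cj : Char),
    cs[m]? = some cj → (∀ x ∈ D, i + m < x) →
    (allowedBases.filter (fun b => b ≠ cj)).flatMap
        (fun b => (Eb cs i D).map (fun t => t.take m ++ b :: t.drop (m + 1)))
      = Eb cs i ((i + (m : Int)) :: D) := by
  intro cs
  induction cs with
  | nil => intro m i D cj hc _; simp at hc
  | cons c cs ih =>
    intro m i D cj hc hD
    cases m with
    | zero =>
      rw [List.getElem?_cons_zero] at hc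
      injection hc with hc; subst hc
      simp only [Int.natCast_zero, add_zero] at hD ⊢
      have hiD : i ∉ D := fun hx => by have := hD i hx; omega
      have hrw : Eb cs (i + 1) (i :: D) = Eb cs (i + 1) D := by
        apply Eb_congr
        intro j hj
        simp
        omega
      rw [show Eb (c :: cs) i D = (Eb cs (i + 1) D).map (c :: ·) from by
        simp [Eb, hiD]]
      rw [show Eb (c :: cs) i (i :: D) =
          (allowedBases.filter (fun b => b ≠ c)).flatMap
            (fun b => (Eb cs (i + 1) D).map (b :: ·)) from by
        simp only [Eb, if_pos (List.mem_cons_self), hrw]]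
      simp only [List.map_map]
      congr 1
    | succ m =>
      rw [List.getElem?_cons_succ] at hc
      have hcast : i + ((m + 1 : Nat) : Int) = (i + 1) + (m : Int) := by push_cast; ring
      have hiD : i ∉ D := fun hx => by
        have := hD i hx
        have hm : (0 : Int) ≤ ((m + 1 : Nat) : Int) := Int.natCast_nonneg _
        omega
      have hintD : i ∉ ((i + 1) + (m : Int)) :: D := by
        simp only [List.mem_cons]
        rintro (he | hx)
        · have hm : (0 : Int) ≤ (m : Int) := Int.natCast_nonneg _
          omega
        · exact hiD hx
      have hD' : ∀ x ∈ D, (i + 1) + (m : Int) < x := by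
        intro x hx
        have := hD x hx
        rw [hcast] at this
        exact this
      have hIH := ih m (i + 1) D cj hc hD'
      rw [hcast]
      rw [show Eb (c :: cs) i D = (Eb cs (i + 1) D).map (c :: ·) from by
        simp [Eb, hiD]]
      rw [show Eb (c :: cs) i (((i + 1) + (m : Int)) :: D) =
          (Eb cs (i + 1) (((i + 1) + (m : Int)) :: D)).map (c :: ·) from by
        simp [Eb, hintD]]
      rw [← hIH]
      simp only [List.map_flatMap, List.map_map]
      congr 1

theorem pv_flatMap_congr_mem {α β : Type} (l : List α) (f g : α → List β)
    (h : ∀ a ∈ l, f a = g a) : l.flatMap f = l.flatMap g := by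
  induction l with
  | nil => rfl
  | cons x xs ih =>
    rw [List.flatMap_cons, List.flatMap_cons, h x (by simp), ih (fun a ha => h a (by simp [ha]))]

-- for in-range sorted position lists, substB computes Eb
theorem substB_eq_Eb (cs : List Char) : ∀ (d : Nat) (start : Int), 0 ≤ start →
    ∀ D ∈ choicesB cs start d, substB cs D = Eb cs 0 D := by
  intro d
  induction d with
  | zero =>
    intro start _ D hD
    simp [choicesB] at hD
    subst hD
    -- Eb with no chosen positions is [cs]
    have : ∀ (cs' : List Char) (i : Int), Eb cs' i [] = [cs'] := by
      intro cs'
      induction cs' with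
      | nil => intro i; rfl
      | cons c cs' ih => intro i; simp [Eb, ih (i + 1)]
    simp [substB, this]
  | succ d ih =>
    intro start hstart D hD
    simp only [choicesB, List.mem_flatMap, List.mem_map] at hD
    obtain ⟨j, hj, rest, hrest, rfl⟩ := hD
    rw [PySem.List.mem_pyRange_one] at hj
    have hj0 : 0 ≤ j := le_trans hstart hj.1
    have hjlen : j.toNat < cs.length := by omega
    have hget : PySem.List.pyGet? cs j = some cs[j.toNat] := by
      have h1 : PySem.List.pyGet? cs ((j.toNat : Nat) : Int) = cs[j.toNat]? :=
        PySem.List.pyGet?_natCast cs j.toNat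
      rw [Int.toNat_of_nonneg hj0] at h1
      rw [h1, List.getElem?_eq_getElem hjlen]
    have hgt : ∀ x ∈ rest, (0 : Int) + (j.toNat : Int) < x := by
      intro x hx
      have := choices_mem_ge d cs (j + 1) rest hrest x hx
      omega
    show substB cs (j :: rest) = Eb cs 0 (j :: rest)
    simp only [substB, hget]
    rw [ih (j + 1) (by omega) rest hrest]
    have := sub_Eb cs j.toNat 0 rest cs[j.toNat] (List.getElem?_eq_getElem hjlen) hgt
    rw [this]
    congr 2
    omega

-- choicesB enumerates exactly pyCombinations of the index range, in the same order
theorem choicesB_eq : ∀ (cs : List Char) (n : Nat) (start : Int),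
    ((cs.length : Int) - start).toNat ≤ n →
    ∀ (d : Nat), choicesB cs start d = pyCombinations (PySem.List.pyRange start (cs.length : Int) 1) d := by
  intro cs n
  induction n with
  | zero =>
    intro start hn d
    have hLs : (cs.length : Int) ≤ start := by omega
    rw [PySem.List.pyRange_one_eq_nil hLs]
    cases d with
    | zero => rfl
    | succ d =>
      simp only [choicesB]
      rw [PySem.List.pyRange_one_eq_nil (by push_cast; omega)]
      rfl
  | succ n ihn =>
    intro start hn d
    cases d with
    | zero => rw [comb_zero]; rfl
    | succ d =>
      by_cases hLs : (cs.length : Int) ≤ start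
      · rw [PySem.List.pyRange_one_eq_nil hLs]
        simp only [choicesB]
        rw [PySem.List.pyRange_one_eq_nil (by push_cast; omega)]
        rfl
      · push_neg at hLs
        rw [PySem.List.pyRange_one_cons hLs]
        simp only [pyCombinations]
        by_cases h2 : start < (cs.length : Int) - d
        · simp only [choicesB]
          rw [show (cs.length : Int) - ((d : Int) + 1) + 1 = (cs.length : Int) - (d : Int) from by ring]
          rw [PySem.List.pyRange_one_cons (by omega), List.flatMap_cons]
          rw [← ihn (start + 1) (by omega) d]
          congr 1
          have : choicesB cs (start + 1) (d + 1) = pyCombinations (PySem.List.pyRange (start + 1) (cs.length : Int) 1) (d + 1) :=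
            ihn (start + 1) (by omega) (d + 1)
          rw [← this]
          simp only [choicesB]
          rw [show (cs.length : Int) - ((d : Int) + 1) + 1 = (cs.length : Int) - (d : Int) from by ring]
        · push_neg at h2
          have hempty : choicesB cs start (d + 1) = [] := by
            simp only [choicesB]
            rw [show (cs.length : Int) - ((d : Int) + 1) + 1 = (cs.length : Int) - (d : Int) from by ring]
            rw [PySem.List.pyRange_one_eq_nil (by omega)]
            rfl
          rw [hempty]
          have hshort : pyCombinations (PySem.List.pyRange start (cs.length : Int) 1) (d + 1) = [] := by
            apply comb_short
            rw [PySem.List.length_pyRange_one]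
            omega
          rw [← hshort]
          rw [PySem.List.pyRange_one_cons hLs] at hshort
          simp only [pyCombinations] at hshort ⊢
          rw [PySem.List.pyRange_one_cons hLs]
          simp only [pyCombinations]

-- per-sequence and whole-function assembly ----------------------------------

-- B's nested insertion loops fold exactly over the blocksE stream
theorem per_seq_B (s : String) (k : Int) (h0 : 0 ≤ k) (hk : k ≤ PySem.Str.len s)
    (r : PySem.Dict String String) :
    (List.range (k.toNat + 1)).foldl (fun r d =>
      (choicesB s.toList 0 d).foldl (fun r positions =>
        (substB s.toList positions).foldl
          (fun (r : PySem.Dict String String) t => r.insert (String.ofList t) s) r) r) r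
    = (blocksE s.toList (allCombos (s.toList.length : Int) (k.toNat + 1))).foldl
        (fun (r : PySem.Dict String String) t => r.insert t s) r := by
  have hstream : (List.range (k.toNat + 1)).flatMap (fun d =>
      (choicesB s.toList 0 d).flatMap (fun D => (substB s.toList D).map (fun t => String.ofList t)))
      = blocksE s.toList (allCombos (s.toList.length : Int) (k.toNat + 1)) := by
    have h1 : ∀ d ∈ List.range (k.toNat + 1),
        (choicesB s.toList 0 d).flatMap (fun D => (substB s.toList D).map (fun t => String.ofList t))
        = (pyCombinations (PySem.List.pyRange 0 (s.toList.length : Int) 1) d).flatMap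
            (fun D => (Eb s.toList 0 D).map (fun t => String.ofList t)) := by
      intro d _
      rw [← choicesB_eq s.toList s.toList.length 0 (by simp) d]
      apply pv_flatMap_congr_mem
      intro D hD
      rw [substB_eq_Eb s.toList d 0 le_rfl D hD]
    rw [pv_flatMap_congr_mem _ _ _ h1]
    unfold blocksE allCombos
    rw [List.flatMap_assoc]
  calc (List.range (k.toNat + 1)).foldl (fun r d =>
        (choicesB s.toList 0 d).foldl (fun r positions =>
          (substB s.toList positions).foldl
            (fun (r : PySem.Dict String String) t => r.insert (String.ofList t) s) r) r) r
      = ((List.range (k.toNat + 1)).flatMap (fun d =>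
          (choicesB s.toList 0 d).flatMap (fun D =>
            (substB s.toList D).map (fun t => String.ofList t)))).foldl
          (fun (r : PySem.Dict String String) t => r.insert t s) r := by
        rw [pv_foldl_flatMap]
        apply PySem.List.foldl_congr_mem
        intro acc d _
        rw [pv_foldl_flatMap]
        apply PySem.List.foldl_congr_mem
        intro acc' D _
        rw [List.foldl_map]
    _ = (blocksE s.toList (allCombos (s.toList.length : Int) (k.toNat + 1))).foldl
          (fun (r : PySem.Dict String String) t => r.insert t s) r := by rw [hstream]

theorem fold_body_eq (k : Int) (x : String)
    (hx : PySem.Str.strip x = "" ∨ (0 ≤ k ∧ k ≤ PySem.Str.len (PySem.Str.strip x)))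
    (acc : PySem.Dict String String) :
    (if PySem.Str.strip x = "" then acc
     else (mismatchSeqsA (PySem.Str.strip x) k).foldl
       (fun r t => r.insert t (PySem.Str.strip x)) acc) =
    (if PySem.Str.strip x = "" then acc
     else if k < 0 then acc
     else if PySem.Str.len (PySem.Str.strip x) < k then acc
     else
       (List.range (k.toNat + 1)).foldl (fun r d =>
         (choicesB (PySem.Str.strip x).toList 0 d).foldl (fun r positions =>
           (substB (PySem.Str.strip x).toList positions).foldl
             (fun (r : PySem.Dict String String) t => r.insert (String.ofList t) (PySem.Str.strip x)) r) r) acc) := by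
  by_cases ht : PySem.Str.strip x = ""
  · rw [if_pos ht, if_pos ht]
  · rcases hx with hx | ⟨h0, hk⟩
    · exact absurd hx ht
    · rw [if_neg ht, if_neg ht, if_neg (by omega), if_neg (by omega)]
      rw [setA_eq (PySem.Str.strip x) k h0 hk, per_seq_B (PySem.Str.strip x) k h0 hk acc]

-- ===== VERDICT (by name: the statement is the Claim_ definition above) =====
theorem create_mismatch_origin_dict_spec : Claim_equal_create_mismatch_origin_dict := by
  intro origin_seqs n_mismatch _ hpre
  unfold Spec_create_mismatch_origin_dict
  unfold create_mismatch_origin_dict create_mismatch_origin_dict_alt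
  congr 1
  apply PySem.List.foldl_congr_mem
  intro acc x hx
  exact fold_body_eq n_mismatch x (hpre x hx) acc
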